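-- pv_equiv track=rewrite | github.com/Kuneosu/study-algo | 프로그래머스/unrated/181932. 코드 처리하기/코드 처리하기.py | solution
-- ===== SOURCE A (Python) =====
-- def solution(code):
--     ret = ''
--     idx = 0
--     mode = 0
--     for c in code:
--         # mode = 0
--         if mode == 0:
--             # code[idx]가 "1"이 아닐때
--             if c != "1":
--                 # idx가 짝수일 때
--                 if idx %2 == 0:
--                     ret += c
--             # code[idx]가 "1"일 때
--             else:
--                 mode = 1
--         # mode = 1
--         else:
--             # code[idx]가 "1"이 아닐때
--             if c != "1":
--                 # idx가 홀수일 때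
--                 if idx %2 == 1:
--                     ret += c
--             # code[idx]가 "1"일 때
--             else:
--                 mode = 0
--         idx += 1
--
--     if ret == '':
--         ret = "EMPTY"
--     return ret
-- ===== SOURCE B (Python) =====
-- def solution(code):
--     ones = [0]
--     for c in code:
--         ones.append(ones[-1] + (c == '1'))
--     s = ''.join(c for i, c in enumerate(code) if c != '1' and i % 2 == ones[i] % 2)
--     return s if s else 'EMPTY'
-- ===== Notes on version B (the rewrite author's own statement) =====
-- stated objective: simpler
-- what changed: Replaced A's mode-toggling state machine (mode flag flipped on each '1', string concatenation inside nested branches) with a prefix table of '1'-counts plus a single filtering comprehension keeping c at index i iff c != '1' and i % 2 == ones[i] % 2.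
import Mathlib
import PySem

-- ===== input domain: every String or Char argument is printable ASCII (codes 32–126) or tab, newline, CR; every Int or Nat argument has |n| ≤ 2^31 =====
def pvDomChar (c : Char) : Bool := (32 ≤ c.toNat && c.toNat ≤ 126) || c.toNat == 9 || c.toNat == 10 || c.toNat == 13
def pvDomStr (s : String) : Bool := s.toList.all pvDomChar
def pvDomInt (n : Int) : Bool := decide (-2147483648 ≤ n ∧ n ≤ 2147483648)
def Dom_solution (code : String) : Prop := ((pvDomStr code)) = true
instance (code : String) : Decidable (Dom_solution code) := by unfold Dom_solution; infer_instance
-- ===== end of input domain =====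

-- B replaces A's mode-toggling state machine by a prefix table of '1'-counts plus one
-- filtering comprehension (objective: simpler decomposition, same O(n) cost).

-- ===== PORT A =====
-- A's loop state: (ret, idx, mode); ret is the accumulated output (as chars).
def solStepA (s : List Char × Nat × Nat) (c : Char) : List Char × Nat × Nat :=
  let ret := s.1; let idx := s.2.1; let mode := s.2.2
  if mode = 0 then
    if c ≠ '1' then
      (if idx % 2 = 0 then ret ++ [c] else ret, idx + 1, mode)
    else (ret, idx + 1, 1)
  else
    if c ≠ '1' then
      (if idx % 2 = 1 then ret ++ [c] else ret, idx + 1, mode)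
    else (ret, idx + 1, 0)

def solution (code : String) : String :=
  let st := code.toList.foldl solStepA ([], 0, 0)
  if st.1 = [] then "EMPTY" else String.mk st.1

-- ===== PORT B =====
-- ones[-1] + (c == '1')  appended for each c, starting from [0]
def solOnes (cs : List Char) : List Int :=
  cs.foldl (fun acc c => acc ++ [acc.getLast! + (if c == '1' then 1 else 0)]) [0]

def solution_alt (code : String) : String :=
  let cs := code.toList
  let ones := solOnes cs
  let s := ((PySem.List.enumerate cs).filter
      (fun p => p.2 != '1' && PySem.Int.mod p.1 2 == PySem.Int.mod (PySem.List.pyGetD ones p.1 0) 2)).map (·.2)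
  if s = [] then "EMPTY" else String.mk s

-- ===== PRECONDITION & SPEC =====
def Spec_solution (code : String) (out : String) : Prop := out = solution_alt code
instance (code : String) (out : String) : Decidable (Spec_solution code out) := by unfold Spec_solution; infer_instance

-- ===== CLAIM (what is proved, stated in full; the proofs are below) =====
def Claim_equal_solution : Prop := ∀ (code : String), Dom_solution code → Spec_solution code (solution code)

-- ===== LEMMAS AND PROOFS =====

-- common specification: kept characters of l, where idx is the global index of l's head
-- and m the number of '1's already seen
def solSpec (l : List Char) (idx m : Nat) : List Char :=
  match l with
  | [] => []
  | c :: l =>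
    if c = '1' then solSpec l (idx + 1) (m + 1)
    else if idx % 2 = m % 2 then c :: solSpec l (idx + 1) m
    else solSpec l (idx + 1) m

lemma solStepA_one0 (ret : List Char) (idx : Nat) :
    solStepA (ret, idx, 0) '1' = (ret, idx + 1, 1) := by simp [solStepA]

lemma solStepA_one1 (ret : List Char) (idx : Nat) :
    solStepA (ret, idx, 1) '1' = (ret, idx + 1, 0) := by simp [solStepA]

lemma solStepA_c0 (ret : List Char) (idx : Nat) (c : Char) (h : c ≠ '1') :
    solStepA (ret, idx, 0) c = (if idx % 2 = 0 then ret ++ [c] else ret, idx + 1, 0) := by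
  simp [solStepA, h]

lemma solStepA_c1 (ret : List Char) (idx : Nat) (c : Char) (h : c ≠ '1') :
    solStepA (ret, idx, 1) c = (if idx % 2 = 1 then ret ++ [c] else ret, idx + 1, 1) := by
  simp [solStepA, h]

lemma solSpec_one (l : List Char) (idx m : Nat) :
    solSpec ('1' :: l) idx m = solSpec l (idx + 1) (m + 1) := by simp [solSpec]

lemma solSpec_cons (c : Char) (l : List Char) (idx m : Nat) (h : c ≠ '1') :
    solSpec (c :: l) idx m
      = if idx % 2 = m % 2 then c :: solSpec l (idx + 1) m else solSpec l (idx + 1) m := by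
  simp [solSpec, h]

lemma solA_fold (l : List Char) : ∀ (ret : List Char) (idx m md : Nat), md = m % 2 →
    (l.foldl solStepA (ret, idx, md)).1 = ret ++ solSpec l idx m := by
  induction l with
  | nil => intro ret idx m md _; simp [solSpec]
  | cons c l ih =>
    intro ret idx m md hmd
    rw [List.foldl_cons]
    by_cases h0 : md = 0
    · subst h0
      have hm : m % 2 = 0 := hmd.symm
      by_cases h1 : c = '1'
      · subst h1
        rw [solStepA_one0, ih ret (idx + 1) (m + 1) 1 (by omega), solSpec_one]
      · rw [solStepA_c0 ret idx c h1, ih _ (idx + 1) m 0 hmd, solSpec_cons c l idx m h1, hm]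
        by_cases hi : idx % 2 = 0 <;> simp [hi]
    · have h0' : md = 1 := by omega
      subst h0'
      have hm : m % 2 = 1 := hmd.symm
      by_cases h1 : c = '1'
      · subst h1
        rw [solStepA_one1, ih ret (idx + 1) (m + 1) 0 (by omega), solSpec_one]
      · rw [solStepA_c1 ret idx c h1, ih _ (idx + 1) m 1 hmd, solSpec_cons c l idx m h1, hm]
        by_cases hi : idx % 2 = 1 <;> simp [hi]

def solCount (l : List Char) : Nat := l.countP (fun c => c = '1')

-- prefix sums of 1-or-0, as a recursive scan
def solScan : Int → List Char → List Int
  | m, [] => [m]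
  | m, c :: l => m :: solScan (m + (if c == '1' then 1 else 0)) l

lemma solGetLast!_eq (acc : List Int) (h : acc ≠ []) : acc.getLast! = acc.getLast h := by
  cases acc with
  | nil => exact absurd rfl h
  | cons a as => rfl

lemma solGetLast!_concat (l : List Int) (x : Int) : (l ++ [x]).getLast! = x := by
  rw [solGetLast!_eq _ (by simp)]
  exact List.getLast_concat

-- the foldl building ones is solScan
lemma solOnes_foldl (l : List Char) : ∀ (acc : List Int), (h : acc ≠ []) →
    l.foldl (fun acc c => acc ++ [acc.getLast! + (if c == '1' then 1 else 0)]) acc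
      = acc.dropLast ++ solScan acc.getLast! l := by
  induction l with
  | nil =>
    intro acc h
    simp only [List.foldl_nil, solScan, solGetLast!_eq acc h]
    exact (List.dropLast_append_getLast h).symm
  | cons c l ih =>
    intro acc h
    rw [List.foldl_cons, ih _ (by simp), List.dropLast_concat, solGetLast!_concat]
    simp only [solScan]
    rw [← List.singleton_append, ← List.append_assoc, solGetLast!_eq acc h,
      List.dropLast_append_getLast h]

lemma solScan_getD (l : List Char) : ∀ (m : Int) (i : Nat), i ≤ l.length →
    (solScan m l).getD i 0 = m + (solCount (l.take i) : Int) := by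
  induction l with
  | nil =>
    intro m i h
    have : i = 0 := Nat.le_zero.mp h
    subst this; simp [solScan, solCount]
  | cons c l ih =>
    intro m i h
    cases i with
    | zero => simp [solScan, solCount]
    | succ i =>
      simp only [solScan, List.getD_cons_succ, List.take_succ_cons]
      rw [ih _ i (by simpa using h)]
      by_cases hc : c = '1' <;> simp [solCount, hc] <;> push_cast <;> ring

lemma solOnes_getD (cs : List Char) (i : Nat) (h : i ≤ cs.length) :
    (solOnes cs).getD i 0 = (solCount (cs.take i) : Int) := by
  unfold solOnes
  rw [solOnes_foldl cs [0] (by simp)]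
  simpa using solScan_getD cs 0 i h

lemma solMod_natCast (a b : Nat) :
    (PySem.Int.mod (a : Int) 2 == PySem.Int.mod (b : Int) 2) = ((a % 2 : Nat) == (b % 2 : Nat)) := by
  have ha : PySem.Int.mod (a : Int) 2 = ((a % 2 : Nat) : Int) := by
    exact_mod_cast PySem.Int.mod_natCast a 2
  have hb : PySem.Int.mod (b : Int) 2 = ((b % 2 : Nat) : Int) := by
    exact_mod_cast PySem.Int.mod_natCast b 2
  rw [Bool.eq_iff_iff]
  simp only [ha, hb, beq_iff_eq]
  exact ⟨fun h => by exact_mod_cast h, fun h => by exact_mod_cast h⟩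

-- B's filtered enumerate equals solSpec, for a table T matching the prefix counts
lemma solB_filter (T : List Int) (l : List Char) : ∀ (k m : Nat),
    (∀ j : Nat, j < l.length → PySem.List.pyGetD T ((k : Int) + j) 0 = (m : Int) + solCount (l.take j)) →
    ((PySem.List.enumerate l (k : Int)).filter
        (fun p => p.2 != '1' && PySem.Int.mod p.1 2 == PySem.Int.mod (PySem.List.pyGetD T p.1 0) 2)).map (·.2)
      = solSpec l k m := by
  induction l with
  | nil => intro k m _; simp [PySem.List.enumerate_nil, solSpec]
  | cons c l ih =>
    intro k m hT
    have h0 : PySem.List.pyGetD T (k : Int) 0 = (m : Int) := by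
      have := hT 0 (by simp)
      simpa [solCount] using this
    have hrec : ∀ j : Nat, j < l.length →
        PySem.List.pyGetD T (((k + 1 : Nat) : Int) + j) 0
          = ((if c = '1' then m + 1 else m : Nat) : Int) + solCount (l.take j) := by
      intro j hj
      have h2 := hT (j + 1) (by simpa using Nat.succ_lt_succ hj)
      have h3 : ((k + 1 : Nat) : Int) + j = (k : Int) + ((j + 1 : Nat) : Int) := by push_cast; ring
      rw [h3, h2]
      by_cases hc : c = '1' <;> simp [solCount, hc] <;> push_cast <;> ring
    simp only [PySem.List.enumerate_cons, List.filter_cons]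
    rw [show ((k : Int) + 1) = ((k + 1 : Nat) : Int) by push_cast; ring]
    by_cases hc : c = '1'
    · subst hc
      have hfalse : (('1' != '1') && (PySem.Int.mod (k : Int) 2
          == PySem.Int.mod (PySem.List.pyGetD T (k : Int) 0) 2)) = false := by simp
      rw [hfalse]
      simp only [Bool.false_eq_true, if_false]
      rw [ih (k + 1) (m + 1) (by intro j hj; simpa using hrec j hj)]
      exact (solSpec_one l k m).symm
    · have hcond : ((c != '1') && (PySem.Int.mod (k : Int) 2
          == PySem.Int.mod (PySem.List.pyGetD T (k : Int) 0) 2)) = ((k % 2 : Nat) == (m % 2 : Nat)) := by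
        rw [h0, solMod_natCast k m]
        simp [bne, hc]
      rw [hcond, solSpec_cons c l k m hc]
      have hI := ih (k + 1) m (by intro j hj; simpa [hc] using hrec j hj)
      by_cases hk : k % 2 = m % 2
      · rw [if_pos (by simp [hk] : (k % 2 == m % 2) = true)]
        simp only [List.map_cons]
        rw [hI, if_pos hk]
      · rw [if_neg (by simp [hk] : ¬ (k % 2 == m % 2) = true)]
        rw [hI, if_neg hk]

lemma sol_main (code : String) : solution code = solution_alt code := by
  unfold solution solution_alt
  have hA : (code.toList.foldl solStepA ([], 0, 0)).1 = solSpec code.toList 0 0 := by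
    exact (solA_fold code.toList [] 0 0 0 rfl).trans (by simp)
  have hB : ((PySem.List.enumerate code.toList (0 : Int)).filter
      (fun p => p.2 != '1' && PySem.Int.mod p.1 2 == PySem.Int.mod (PySem.List.pyGetD (solOnes code.toList) p.1 0) 2)).map (·.2)
      = solSpec code.toList 0 0 := by
    apply solB_filter (solOnes code.toList) code.toList 0 0
    intro j hj
    simp only [Nat.cast_zero, zero_add]
    rw [PySem.List.pyGetD_natCast, solOnes_getD code.toList j (le_of_lt hj)]
  simp only [hA, hB]

-- ===== VERDICT (by name: the statement is the Claim_ definition above) =====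
theorem solution_spec : Claim_equal_solution := by
  intro code _
  unfold Spec_solution
  exact sol_main code
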